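-- pv_equiv track=rewrite | github.com/PaderinaViola/interview_practice | codesignal/trav_sum_4.py | f
-- ===== SOURCE A (Python) =====
-- def f(n):
--     arr = []
--     while n > 0:
--         n_new = n % 10
--         n = n // 10
--         arr.append(n_new)
--     count = 1
--     for i in range(len(arr)):
--         for j in range(1, len(arr)):
--             if arr[j] != arr[i]:
--                 count += 1
--                 i = j
--         break
--     return count
-- ===== SOURCE B (Python) =====
-- def f(n):
--     # count runs of consecutive equal digits of n (1 for n <= 0, matching A)
--     if n <= 9:
--         return 1
--     q = n // 10
--     return f(q) + (1 if n % 10 != q % 10 else 0)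
-- ===== Notes on version B (the rewrite author's own statement) =====
-- stated objective: simpler
-- what changed: Replaces A's explicit digit-list construction plus the nested index loop with a break by a direct recursion on the quotient by ten that compares the two lowest digits arithmetically, keeping no list at all.
import Mathlib
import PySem

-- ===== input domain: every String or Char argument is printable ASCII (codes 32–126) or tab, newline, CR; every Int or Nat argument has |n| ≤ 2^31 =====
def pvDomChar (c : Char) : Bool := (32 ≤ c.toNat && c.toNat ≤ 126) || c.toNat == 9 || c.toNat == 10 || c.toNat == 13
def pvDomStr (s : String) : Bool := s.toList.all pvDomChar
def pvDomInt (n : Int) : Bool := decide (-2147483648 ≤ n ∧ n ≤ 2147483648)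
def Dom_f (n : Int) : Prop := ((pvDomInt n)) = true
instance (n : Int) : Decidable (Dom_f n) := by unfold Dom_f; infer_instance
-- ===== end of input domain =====

-- B replaces A's digit list + nested index loop by a direct recursion on the quotient by ten (simpler, no list).

-- ===== PORT A =====
-- the 'while n > 0' loop building arr (least-significant digit first, appended in order = cons order here)
def fDigits (n : Int) : List Int :=
  if 0 < n then PySem.Int.mod n 10 :: fDigits (PySem.Int.floordiv n 10) else []
termination_by n.toNat
decreasing_by
  rename_i h
  rw [PySem.Int.floordiv_eq_ediv_of_pos (by norm_num)]
  omega

-- A's outer 'for i in range(len(arr)): … break' runs the inner loop exactly once when arr ≠ []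
-- (with i as part of the fold state), and not at all when arr = [].
def f (n : Int) : Int :=
  let arr := fDigits n
  if arr.length = 0 then 1
  else
    ((PySem.List.pyRange 1 (arr.length : Int) 1).foldl
      (fun st j =>
        if PySem.List.pyGetD arr j 0 ≠ PySem.List.pyGetD arr st.2 0 then (st.1 + 1, j) else st)
      (1, 0)).1

-- ===== PORT B =====
def f_alt (n : Int) : Int :=
  if n ≤ 9 then 1
  else
    f_alt (PySem.Int.floordiv n 10) +
      (if PySem.Int.mod n 10 ≠ PySem.Int.mod (PySem.Int.floordiv n 10) 10 then 1 else 0)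
termination_by n.toNat
decreasing_by
  rename_i h
  rw [PySem.Int.floordiv_eq_ediv_of_pos (by norm_num)]
  omega

-- ===== PRECONDITION & SPEC =====
def Spec_f (n : Int) (out : Int) : Prop := out = f_alt n
instance (n : Int) (out : Int) : Decidable (Spec_f n out) := by unfold Spec_f; infer_instance

-- ===== CLAIM (what is proved, stated in full; the proofs are below) =====
def Claim_equal_f : Prop := ∀ (n : Int), Dom_f n → Spec_f n (f n)

-- ===== LEMMAS AND PROOFS =====

-- number of adjacent unequal pairs in a list
def runTrans : List Int → Int
  | a :: b :: t => (if b ≠ a then 1 else 0) + runTrans (b :: t)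
  | _ => 0

lemma fDigits_pos {n : Int} (h : 0 < n) :
    fDigits n = PySem.Int.mod n 10 :: fDigits (PySem.Int.floordiv n 10) := by
  rw [fDigits.eq_def]; simp [h]

lemma fDigits_nonpos {n : Int} (h : ¬ 0 < n) : fDigits n = [] := by
  rw [fDigits.eq_def]; simp [h]

-- A's inner loop keeps (count, index i); replacing the index by the VALUE arr[i] is a bisimulation.
lemma sim (arr js : List Int) : ∀ (st : Int × Int) (v : Int),
    PySem.List.pyGetD arr st.2 0 = v →
    (js.foldl
      (fun st j =>
        if PySem.List.pyGetD arr j 0 ≠ PySem.List.pyGetD arr st.2 0 then (st.1 + 1, j) else st)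
      st).1
      = ((js.map (fun j => PySem.List.pyGetD arr j 0)).foldl
          (fun st x => if x ≠ st.2 then (st.1 + 1, x) else st) (st.1, v)).1 ∧
    PySem.List.pyGetD arr
      ((js.foldl
        (fun st j =>
          if PySem.List.pyGetD arr j 0 ≠ PySem.List.pyGetD arr st.2 0 then (st.1 + 1, j) else st)
        st).2) 0
      = ((js.map (fun j => PySem.List.pyGetD arr j 0)).foldl
          (fun st x => if x ≠ st.2 then (st.1 + 1, x) else st) (st.1, v)).2 := by
  induction js with
  | nil => intro st v h; exact ⟨rfl, h⟩
  | cons j t ih =>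
    intro st v h
    simp only [List.foldl_cons, List.map_cons]
    by_cases hc : PySem.List.pyGetD arr j 0 ≠ PySem.List.pyGetD arr st.2 0
    · rw [if_pos hc, if_pos (h ▸ hc)]
      exact ih (st.1 + 1, j) _ rfl
    · rw [if_neg hc, if_neg (h ▸ hc)]
      exact ih st v h

-- the value-carrying loop counts the transitions
lemma fold_val (t : List Int) : ∀ (c a : Int),
    (t.foldl (fun st x => if x ≠ st.2 then (st.1 + 1, x) else st) (c, a)).1
      = c + runTrans (a :: t) := by
  induction t with
  | nil => intro c a; simp [runTrans]
  | cons b t ih =>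
    intro c a
    simp only [List.foldl_cons]
    by_cases hc : b ≠ a
    · rw [if_pos hc, ih]
      simp only [runTrans, if_pos hc]
      ring
    · rw [if_neg hc, ih]
      have hb : b = a := not_ne_iff.mp hc
      simp [runTrans, hb]

lemma f_eq (n : Int) : f n = 1 + runTrans (fDigits n) := by
  cases harr : fDigits n with
  | nil => simp [f, harr, runTrans]
  | cons a t =>
    have h0 : PySem.List.pyGetD (a :: t) ((0 : Int)) 0 = a := by simp [pysem]
    have hs := sim (a :: t) (PySem.List.pyRange 1 (((a :: t).length : Int)) 1) (1, 0) a h0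
    have hmap : (PySem.List.pyRange 1 (((a :: t).length : Int)) 1).map
        (fun j => PySem.List.pyGetD (a :: t) j 0) = t := by
      simpa using PySem.List.map_pyGetD_pyRange' (a :: t) 0 (show (0:Int) ≤ 1 by norm_num)
    simp only [f, harr]
    rw [if_neg (by simp)]
    rw [hs.1, hmap, fold_val]

lemma f_alt_eq (n : Int) : f_alt n = 1 + runTrans (fDigits n) := by
  generalize hk : n.toNat = k
  induction k using Nat.strong_induction_on generalizing n with
  | _ k ih =>
    by_cases h9 : n ≤ 9
    · rw [f_alt, if_pos h9]
      by_cases hp : 0 < n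
      · have hq : PySem.Int.floordiv n 10 = 0 := by
          rw [PySem.Int.floordiv_eq_ediv_of_pos (by norm_num)]; omega
        rw [fDigits_pos hp, hq, fDigits_nonpos (by norm_num)]
        simp [runTrans]
      · rw [fDigits_nonpos hp]; simp [runTrans]
    · have hp : 0 < n := by omega
      have hq10 : PySem.Int.floordiv n 10 = n / 10 :=
        PySem.Int.floordiv_eq_ediv_of_pos (by norm_num)
      have hqpos : 0 < PySem.Int.floordiv n 10 := by rw [hq10]; omega
      have hlt : (PySem.Int.floordiv n 10).toNat < k := by rw [hq10]; omega
      have ihq := ih _ hlt (n := PySem.Int.floordiv n 10) rfl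
      rw [f_alt, if_neg h9, ihq, fDigits_pos hp, fDigits_pos hqpos]
      simp only [runTrans]
      rcases eq_or_ne (PySem.Int.mod n 10) (PySem.Int.mod (PySem.Int.floordiv n 10) 10) with hd | hd
      · rw [if_neg (not_ne_iff.mpr hd), if_neg (not_ne_iff.mpr hd.symm)]
        ring
      · rw [if_pos hd, if_pos hd.symm]
        ring

-- ===== VERDICT (by name: the statement is the Claim_ definition above) =====
theorem f_spec : Claim_equal_f := by
  intro n _
  unfold Spec_f
  rw [f_eq, f_alt_eq]
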